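-- pv_equiv track=rewrite | github.com/yuqingchen/Leetcode | 475_Heaters.py | findheater
-- ===== SOURCE A (Python) =====
-- def findheater(house, heaters) :
--     start, end = 0, len(heaters) - 1
--     while start + 1 < end :
--         mid = (start + end) // 2
--         if heaters[mid] == house :
--             return 0
--         if heaters[mid] < house :
--             start = mid
--         else :
--             end = mid
--     return min(abs(house - heaters[start]), abs(heaters[end] - house))
-- ===== SOURCE B (Python) =====
-- def findheater(house, heaters):
--     # Same comparison walk as the reference, but as structural recursion on a
--     # shrinking sublist instead of an index-bracketing while loop.
--     def go(w):
--         if len(w) < 3: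
--             return min(abs(house - w[0]), abs(house - w[-1]))
--         r = (len(w) - 1) // 2
--         if w[r] == house:
--             return 0
--         if w[r] < house:
--             return go(w[r:])
--         return go(w[:r + 1])
--     return go(heaters)
-- ===== Notes on version B (the rewrite author's own statement) =====
-- stated objective: alternative
-- what changed: The index-bracketing while loop over (start, end) is replaced by structural recursion on a shrinking sublist (slices w[r:], w[:r+1]); the same comparison sequence is kept because it is observable on unsorted input, but the state is a list, not a pair of indices.
import Mathlib
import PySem

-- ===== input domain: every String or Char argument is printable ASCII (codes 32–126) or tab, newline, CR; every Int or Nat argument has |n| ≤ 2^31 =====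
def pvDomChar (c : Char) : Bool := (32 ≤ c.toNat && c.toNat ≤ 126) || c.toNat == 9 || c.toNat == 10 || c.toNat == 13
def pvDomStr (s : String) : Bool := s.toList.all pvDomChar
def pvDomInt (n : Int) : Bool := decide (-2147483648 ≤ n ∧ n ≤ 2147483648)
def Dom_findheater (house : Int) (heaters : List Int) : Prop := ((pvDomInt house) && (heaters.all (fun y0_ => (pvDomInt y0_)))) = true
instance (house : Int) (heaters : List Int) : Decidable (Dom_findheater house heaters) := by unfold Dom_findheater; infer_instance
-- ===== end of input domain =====

-- B keeps A's comparison walk (observable on unsorted input) but as structural recursion on a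
-- shrinking sublist instead of an index-bracketing while loop; return values proved equal on Pre_.

-- ===== PORT A =====

-- midpoint of a strict bracket is strictly inside it (used by the loop's termination)
theorem pvMidBounds (s e : Int) (h : s + 1 < e) :
    s < PySem.Int.floordiv (s + e) 2 ∧ PySem.Int.floordiv (s + e) 2 < e := by
  constructor
  · have := (PySem.Int.le_floordiv_iff_mul_le (a := s + e) (b := 2) (q := s + 1) (by omega)).mpr (by omega)
    omega
  · exact (PySem.Int.floordiv_lt_iff_lt_mul (a := s + e) (b := 2) (q := e) (by omega)).mpr (by omega)

-- the 'while start + 1 < end' loop of A, step for step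
def findheaterLoop (house : Int) (heaters : List Int) (s e : Int) : Int :=
  if h : s + 1 < e then
    let mid := PySem.Int.floordiv (s + e) 2
    match PySem.List.pyGet? heaters mid with
    | none => 0  -- heaters[mid] raises IndexError (unreachable under Pre_)
    | some hm =>
      if hm = house then 0
      else if hm < house then findheaterLoop house heaters mid e
      else findheaterLoop house heaters s mid
  else
    match PySem.List.pyGet? heaters s, PySem.List.pyGet? heaters e with
    | some a, some b => min |house - a| |b - house|
    | _, _ => 0  -- heaters[start] / heaters[end] raises IndexError (empty list, excluded by Pre_)
termination_by (e - s).toNat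
decreasing_by
  · have := pvMidBounds s e h; omega
  · have := pvMidBounds s e h; omega

def findheater (house : Int) (heaters : List Int) : Int :=
  findheaterLoop house heaters 0 ((heaters.length : Int) - 1)

-- ===== PORT B =====

-- B's recursive helper 'go' over the current sublist w
def findheaterGo (house : Int) (w : List Int) : Int :=
  if _h : w.length < 3 then
    match PySem.List.pyGet? w 0, PySem.List.pyGet? w (-1) with
    | some a, some b => min |house - a| |house - b|
    | _, _ => 0  -- w[0] raises IndexError on the empty list (excluded by Pre_)
  else
    let r : Nat := (w.length - 1) / 2
    match PySem.List.pyGet? w (r : Int) with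
    | none => 0  -- unreachable: r < len w
    | some hr =>
      if hr = house then 0
      else if hr < house then findheaterGo house (PySem.List.slice w (some (r : Int)) none)
      else findheaterGo house (PySem.List.slice w none (some ((r : Int) + 1)))
termination_by w.length
decreasing_by
  · simp only [PySem.List.slice_from_natCast]; simp only [List.length_drop]; omega
  · rw [show ((r : Int) + 1) = ((r + 1 : Nat) : Int) by push_cast; ring,
      PySem.List.slice_to_natCast]
    simp only [List.length_take]; omega

def findheater_alt (house : Int) (heaters : List Int) : Int :=
  findheaterGo house heaters

-- ===== PRECONDITION & SPEC =====
-- Pre_ excludes only the empty heater list, on which the Python A raises IndexError (B does too).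
def Pre_findheater (house : Int) (heaters : List Int) : Prop := heaters ≠ []
instance (house : Int) (heaters : List Int) : Decidable (Pre_findheater house heaters) := by unfold Pre_findheater; infer_instance
def pvWitness_findheater : Int × List Int := (4, [1, 3, 8])

def Spec_findheater (house : Int) (heaters : List Int) (out : Int) : Prop := out = findheater_alt house heaters
instance (house : Int) (heaters : List Int) (out : Int) : Decidable (Spec_findheater house heaters out) := by unfold Spec_findheater; infer_instance

-- ===== CLAIM (what is proved, stated in full; the proofs are below) =====
def Claim_equal_findheater : Prop := ∀ (house : Int) (heaters : List Int), Dom_findheater house heaters → Pre_findheater house heaters → Spec_findheater house heaters (findheater house heaters)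

-- ===== LEMMAS AND PROOFS =====

-- the window heaters[s : e+1] as a list
def pvWin (heaters : List Int) (s e : Int) : List Int :=
  (heaters.drop s.toNat).take ((e - s).toNat + 1)

theorem pvWin_length (heaters : List Int) (s e : Int)
    (hs : 0 ≤ s) (hse : s ≤ e) (he : e < (heaters.length : Int)) :
    (pvWin heaters s e).length = (e - s).toNat + 1 := by
  simp only [pvWin, List.length_take, List.length_drop]
  omega

theorem pvWin_get (heaters : List Int) (s e : Int)
    (hs : 0 ≤ s) (hse : s ≤ e) (he : e < (heaters.length : Int))
    (i : Nat) (hi : i ≤ (e - s).toNat) :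
    PySem.List.pyGet? (pvWin heaters s e) (i : Int) = heaters[s.toNat + i]? := by
  have hlen := pvWin_length heaters s e hs hse he
  have hi2 : i < (pvWin heaters s e).length := by omega
  have hi3 : s.toNat + i < heaters.length := by omega
  rw [PySem.List.pyGet?_natCast]
  rw [List.getElem?_eq_getElem hi2, List.getElem?_eq_getElem hi3]
  simp only [pvWin, List.getElem_take, List.getElem_drop]


-- the terminated loop (e ≤ s + 1) equals go on a window of length ≤ 2
theorem pv_base (house : Int) (heaters : List Int) (s e : Int)
    (hlt : ¬ s + 1 < e) (hs : 0 ≤ s) (hse : s ≤ e) (he : e < (heaters.length : Int)) :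
    findheaterLoop house heaters s e = findheaterGo house (pvWin heaters s e) := by
  have hlen := pvWin_length heaters s e hs hse he
  have hse' : s.toNat < heaters.length := by omega
  have he' : e.toNat < heaters.length := by omega
  have hA : PySem.List.pyGet? heaters s = some heaters[s.toNat] := by
    rw [PySem.List.pyGet?_of_nonneg (h := hs), List.getElem?_eq_getElem hse']
  have hB : PySem.List.pyGet? heaters e = some heaters[e.toNat] := by
    rw [PySem.List.pyGet?_of_nonneg (h := by omega), List.getElem?_eq_getElem he']
  have h0 : PySem.List.pyGet? (pvWin heaters s e) ((0:Nat) : Int) = some heaters[s.toNat] := by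
    rw [pvWin_get heaters s e hs hse he 0 (by omega), List.getElem?_eq_getElem (by omega : s.toNat + 0 < heaters.length)]
    simp
  have hneg : PySem.List.pyGet? (pvWin heaters s e) (-1) = some heaters[e.toNat] := by
    rw [PySem.List.pyGet?_neg_one, List.getLast?_eq_getElem?, hlen]
    have := pvWin_get heaters s e hs hse he (e - s).toNat le_rfl
    rw [PySem.List.pyGet?_natCast] at this
    rw [show (e - s).toNat + 1 - 1 = (e - s).toNat from rfl, this,
      show s.toNat + (e - s).toNat = e.toNat from by omega,
      List.getElem?_eq_getElem he']
  rw [findheaterLoop, findheaterGo, dif_neg hlt, dif_pos (by omega : (pvWin heaters s e).length < 3)]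
  rw [hA, hB]
  have h0' : PySem.List.pyGet? (pvWin heaters s e) 0 = some heaters[s.toNat] := by
    simpa using h0
  rw [h0', hneg]
  simp [abs_sub_comm house heaters[e.toNat]]

-- the loop on bracket (s, e) equals B's go on the sublist heaters[s : e+1] (fuel induction)
theorem loop_go_aux (house : Int) (heaters : List Int) :
    ∀ (n : Nat) (s e : Int), (e - s).toNat ≤ n → 0 ≤ s → s ≤ e → e < (heaters.length : Int) →
    findheaterLoop house heaters s e = findheaterGo house (pvWin heaters s e) := by
  intro n
  induction n with
  | zero =>
    intro s e hn hs hse he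
    exact pv_base house heaters s e (by omega) hs hse he
  | succ n ih =>
    intro s e hn hs hse he
    by_cases hlt : s + 1 < e
    · -- one loop step on each side
      have hmid := pvMidBounds s e hlt
      set mid := PySem.Int.floordiv (s + e) 2 with hmiddef
      have hlen := pvWin_length heaters s e hs hse he
      have hr : ((pvWin heaters s e).length - 1) / 2 = (e - s).toNat / 2 := by omega
      have hmid_eq : mid = s + (((e - s).toNat / 2 : Nat) : Int) := by
        rw [hmiddef, PySem.Int.floordiv_eq_ediv_of_pos (by omega)]
        rw [Int.natCast_ediv]
        push_cast [Int.toNat_of_nonneg (by omega : (0:Int) ≤ e - s)]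
        omega
      have hwlt : ¬ (pvWin heaters s e).length < 3 := by omega
      have hmr : s.toNat + (e - s).toNat / 2 < heaters.length := by omega
      have hmt : mid.toNat = s.toNat + (e - s).toNat / 2 := by omega
      have hgm : PySem.List.pyGet? heaters mid = some (heaters[s.toNat + (e - s).toNat / 2]'hmr) := by
        rw [PySem.List.pyGet?_of_nonneg (h := by omega), hmt, List.getElem?_eq_getElem hmr]
      have hgw : PySem.List.pyGet? (pvWin heaters s e) ((((pvWin heaters s e).length - 1) / 2 : Nat) : Int) = some (heaters[s.toNat + (e - s).toNat / 2]'hmr) := by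
        rw [hr, pvWin_get heaters s e hs hse he ((e - s).toNat / 2) (by omega), List.getElem?_eq_getElem hmr]
      rw [findheaterLoop, findheaterGo, dif_pos hlt, dif_neg hwlt]
      simp only [← hmiddef, hgm, hgw]
      split_ifs with h1 h2
      · rfl
      · rw [ih mid e (by omega) (by omega) (by omega) he]
        congr 1
        rw [hr, PySem.List.slice_from_natCast]
        simp only [pvWin, List.drop_take, List.drop_drop]
        rw [show (e - s).toNat + 1 - (e - s).toNat / 2 = (e - mid).toNat + 1 from by omega, hmt]
      · rw [ih s mid (by omega) hs (by omega) (by omega)]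
        congr 1
        rw [show (↑(((pvWin heaters s e).length - 1) / 2) + 1 : Int) = (((e - s).toNat / 2 + 1 : Nat) : Int) from by push_cast [hr]; ring,
          PySem.List.slice_to_natCast]
        simp only [pvWin, List.take_take]
        rw [show min ((e - s).toNat / 2 + 1) ((e - s).toNat + 1) = (mid - s).toNat + 1 from by omega]
    · exact pv_base house heaters s e hlt hs hse he

theorem loop_eq_go (house : Int) (heaters : List Int) (s e : Int)
    (hs : 0 ≤ s) (hse : s ≤ e) (he : e < (heaters.length : Int)) :
    findheaterLoop house heaters s e =
      findheaterGo house ((heaters.drop s.toNat).take ((e - s).toNat + 1)) := by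
  exact loop_go_aux house heaters (e - s).toNat s e le_rfl hs hse he

-- ===== VERDICT (by name: the statement is the Claim_ definition above) =====
theorem findheater_spec : Claim_equal_findheater := by
  intro house heaters _ hne
  unfold Spec_findheater findheater findheater_alt
  have hlen : 0 < heaters.length := List.length_pos_iff.mpr hne
  rw [loop_eq_go house heaters 0 ((heaters.length : Int) - 1) le_rfl (by omega) (by omega)]
  have harg : ((heaters.drop (0 : Int).toNat).take (((heaters.length : Int) - 1 - 0).toNat + 1)) = heaters := by
    rw [show (((heaters.length : Int) - 1 - 0).toNat + 1) = heaters.length by omega]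
    simp
  rw [harg]
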